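-- pv_equiv track=rewrite | github.com/abhinav13/python-learn | puzzles/substrings/find_all_permutations_within_string.py | dothis
-- ===== SOURCE A (Python) =====
-- import copy
--
-- def make_dict(b):
--     mydict = {}
--     for c in b:
--         if c not in mydict.keys():
--             mydict[c] = 1
--         else:
--             mydict[c] = int(mydict[c]) + 1
--     return mydict
--
-- def remove_from_dict(d, c):
--     if c in d.keys():
--         if d[c] == 1:
--             del d[c]
--         else:
--             d[c] = int(d[c]) -1
--
-- def dothis(s, b):
--     if s is None or b is None:
--         return 0
--     if len(b) > len(s):
--         return 0
--     chars_in_b = make_dict(b)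
--     count_dict = copy.deepcopy(chars_in_b)
--     b_len = len(b)
--     current_len = 0
--     total = 0
--     flag = True
--     traverse = 0
--
--     while traverse < len(s):
--         if s[traverse] in count_dict.keys():
--             remove_from_dict(count_dict, s[traverse])
--             current_len = current_len + 1
--             flag = True
--
--         if current_len == b_len and flag and len(count_dict) == 0:
--             total = total + 1
--             count_dict = copy.deepcopy(chars_in_b)
--
--         if not s[traverse] in chars_in_b.keys():
--             flag = False
--             current_len = 0
--             count_dict = copy.deepcopy(chars_in_b)
--
--         traverse = traverse + 1
--
--     return total
-- ===== SOURCE B (Python) =====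
-- def dothis(s, b):
--     if s is None or b is None:
--         return 0
--     if len(b) > len(s):
--         return 0
--     need = {}
--     for c in b:
--         need[c] = need.get(c, 0) + 1
--
--     def covers(run):
--         return all(run.get(c, 0) >= k for c, k in need.items())
--
--     total = 0
--     run = {}
--     started = False
--     for c in s:
--         if c in need:
--             run[c] = run.get(c, 0) + 1
--             started = True
--         else:
--             if started and covers(run):
--                 total += 1
--             run = {}
--             started = False
--     if started and covers(run):
--         total += 1
--     return total
-- ===== Notes on version B (the rewrite author's own statement) =====
-- stated objective: simpler
-- what changed: A simulates a stateful countdown automaton (remaining-need dict, running length, flag, mid-run refills); B splits s into maximal runs of characters occurring in b and counts each run once iff its character multiset covers b's multiset (Counter-style coverage test at run boundaries).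
-- intended difference: When b is the empty string and s is non-empty, A returns 1 (its initial flag/length state makes the count fire once on the first character), while B returns 0 since s contains no run of b-characters; zero matches for the empty pattern is the intended value. — e.g. on dothis(some "a", some ""): A returns 1, B returns 0
import Mathlib
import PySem

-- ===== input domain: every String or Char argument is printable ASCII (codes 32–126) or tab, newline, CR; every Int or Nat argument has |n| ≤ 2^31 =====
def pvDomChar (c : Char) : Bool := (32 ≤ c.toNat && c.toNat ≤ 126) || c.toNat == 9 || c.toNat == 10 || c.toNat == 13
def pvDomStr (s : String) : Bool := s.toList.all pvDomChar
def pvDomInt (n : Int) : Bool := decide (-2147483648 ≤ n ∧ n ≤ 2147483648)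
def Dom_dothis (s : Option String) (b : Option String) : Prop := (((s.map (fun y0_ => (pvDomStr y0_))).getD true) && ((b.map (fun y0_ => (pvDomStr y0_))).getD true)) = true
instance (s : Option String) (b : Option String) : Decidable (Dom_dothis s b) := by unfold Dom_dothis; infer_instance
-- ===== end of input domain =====

-- B replaces A's stateful countdown automaton by splitting s into maximal runs of
-- b-characters and counting the runs whose character multiset covers b's (objective: simpler).

-- ===== PORT A =====
def pvMakeDict (b : List Char) : PySem.Dict Char Int :=
  b.foldl (fun d c =>
    if d.contains c = false then d.insert c 1 else d.insert c (d.getD c 0 + 1))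
    PySem.Dict.empty

def pvRemoveFromDict (d : PySem.Dict Char Int) (c : Char) : PySem.Dict Char Int :=
  if d.contains c then
    (if d.getD c 0 = 1 then d.erase c else d.insert c (d.getD c 0 - 1))
  else d

def pvLoopA (need : PySem.Dict Char Int) (bl : Int) :
    List Char → PySem.Dict Char Int → Int → Int → Bool → Int
  | [], _, _, total, _ => total
  | c :: rest, cd, cl, total, flag =>
    let st1 : PySem.Dict Char Int × Int × Bool :=
      if cd.contains c then (pvRemoveFromDict cd c, cl + 1, true) else (cd, cl, flag)
    let st2 : Int × PySem.Dict Char Int :=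
      if st1.2.1 = bl ∧ st1.2.2 = true ∧ st1.1.size = 0 then (total + 1, need)
      else (total, st1.1)
    let st3 : Bool × Int × PySem.Dict Char Int :=
      if need.contains c = false then (false, 0, need) else (st1.2.2, st1.2.1, st2.2)
    pvLoopA need bl rest st3.2.2 st3.2.1 st2.1 st3.1

def dothis (s : Option String) (b : Option String) : Int :=
  match s, b with
  | none, _ => 0
  | _, none => 0
  | some s, some b =>
    if PySem.Str.len b > PySem.Str.len s then 0
    else
      let chars_in_b := pvMakeDict b.toList
      pvLoopA chars_in_b (PySem.Str.len b) s.toList chars_in_b 0 0 true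

-- ===== PORT B =====
def pvCovers (need run : PySem.Dict Char Int) : Bool :=
  need.items.all (fun p => run.getD p.1 0 ≥ p.2)

def pvLoopB (need : PySem.Dict Char Int) :
    List Char → PySem.Dict Char Int → Bool → Int → Int
  | [], run, started, total =>
    if started && pvCovers need run then total + 1 else total
  | c :: rest, run, started, total =>
    if need.contains c then
      pvLoopB need rest (run.insert c (run.getD c 0 + 1)) true total
    else
      pvLoopB need rest PySem.Dict.empty false
        (if started && pvCovers need run then total + 1 else total)

def dothis_alt (s : Option String) (b : Option String) : Int :=
  match s, b with
  | none, _ => 0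
  | _, none => 0
  | some s, some b =>
    if PySem.Str.len b > PySem.Str.len s then 0
    else
      let need := b.toList.foldl (fun d c => d.insert c (d.getD c 0 + 1)) PySem.Dict.empty
      pvLoopB need s.toList PySem.Dict.empty false 0

-- ===== PRECONDITION & SPEC =====
-- When b is the empty string and s is non-empty, A returns 1 (its leftover initial
-- flag/length state makes the count fire once on the first character), while B returns 0
-- since s contains no run of b-characters; 0 matches for the empty pattern is the intended value.
def D_dothis (s : Option String) (b : Option String) : Prop :=
  b = some "" ∧ s ≠ none ∧ s ≠ some ""
instance (s : Option String) (b : Option String) : Decidable (D_dothis s b) := by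
  unfold D_dothis; infer_instance

def Spec_dothis (s : Option String) (b : Option String) (out : Int) : Prop :=
  ¬ D_dothis s b → out = dothis_alt s b
instance (s : Option String) (b : Option String) (out : Int) : Decidable (Spec_dothis s b out) := by
  unfold Spec_dothis; infer_instance

def pvDiffWitness_dothis : Option String × Option String := (some "a", some "")
def pvDiffWitnessOut_dothis : Int × Int := (1, 0)

-- ===== CLAIM (what is proved, stated in full; the proofs are below) =====
def Claim_unchanged_dothis : Prop :=
  ∀ (s : Option String) (b : Option String), Dom_dothis s b → Spec_dothis s b (dothis s b)
def Claim_changed_dothis : Prop :=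
  Dom_dothis (pvDiffWitness_dothis.1) (pvDiffWitness_dothis.2) ∧
  D_dothis (pvDiffWitness_dothis.1) (pvDiffWitness_dothis.2) ∧
  dothis (pvDiffWitness_dothis.1) (pvDiffWitness_dothis.2) = pvDiffWitnessOut_dothis.1 ∧
  dothis_alt (pvDiffWitness_dothis.1) (pvDiffWitness_dothis.2) = pvDiffWitnessOut_dothis.2 ∧
  pvDiffWitnessOut_dothis.1 ≠ pvDiffWitnessOut_dothis.2
def Claim_exact_dothis : Prop :=
  ∀ (s : Option String) (b : Option String), Dom_dothis s b → D_dothis s b →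
    dothis s b ≠ dothis_alt s b

-- ===== LEMMAS AND PROOFS =====
def pvSubD (need : PySem.Dict Char Int) (r : Char → Int) : PySem.Dict Char Int :=
  PySem.Dict.mk (need.items.filterMap
    (fun p => if r p.1 < p.2 then some (p.1, p.2 - r p.1) else none))
def pvBump (r : Char → Int) (c : Char) : Char → Int :=
  fun d => if d = c then r d + 1 else r d
lemma key_unique {l : List (Char × Int)} (hnd : (l.map Prod.fst).Nodup)
    {c : Char} {v : Int} (hm : (c, v) ∈ l) : ∀ p ∈ l, p.1 = c → p = (c, v) := by
  induction l with
  | nil => simp at hm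
  | cons a t ih =>
    simp only [List.map_cons, List.nodup_cons] at hnd
    intro p hp hpc
    rcases List.mem_cons.mp hm with h | h
    · rcases List.mem_cons.mp hp with rfl | hp'
      · rw [← h]
      · exfalso; apply hnd.1; rw [← h]
        simpa [← hpc] using List.mem_map_of_mem (f := Prod.fst) hp'
    · rcases List.mem_cons.mp hp with rfl | hp'
      · exfalso; apply hnd.1
        simpa [hpc] using List.mem_map_of_mem (f := Prod.fst) h
      · exact ih hnd.2 h p hp' hpc

lemma contains_pvSubD (need : PySem.Dict Char Int) (r : Char → Int) (c : Char) :
    (pvSubD need r).contains c = true ↔ ∃ p ∈ need.items, p.1 = c ∧ r p.1 < p.2 := by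
  simp only [pvSubD, PySem.Dict.contains, List.any_eq_true, List.mem_filterMap]
  constructor
  · rintro ⟨q, ⟨p, hp, hq⟩, hqc⟩
    split at hq
    · rename_i h; cases Option.some.inj hq
      exact ⟨p, hp, by simpa using hqc, h⟩
    · simp at hq
  · rintro ⟨p, hp, hpc, hlt⟩
    exact ⟨(p.1, p.2 - r p.1), ⟨p, hp, by simp [hlt]⟩, by simp [hpc]⟩

lemma size_pvSubD_zero (need : PySem.Dict Char Int) (r : Char → Int) :
    (pvSubD need r).size = 0 ↔ ∀ p ∈ need.items, ¬ r p.1 < p.2 := by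
  simp only [pvSubD, PySem.Dict.size, List.length_eq_zero_iff, List.filterMap_eq_nil_iff]
  constructor
  · intro h p hp hlt; have := h p hp; simp [hlt] at this
  · intro h p hp; simp [h p hp]

lemma pvSubD_zero (need : PySem.Dict Char Int) (hpos : ∀ p ∈ need.items, (1:Int) ≤ p.2) :
    pvSubD need (fun _ => 0) = need := by
  apply PySem.Dict.ext
  show need.items.filterMap _ = need.items
  rw [show need.items.filterMap (fun p => if (0:Int) < p.2 then some (p.1, p.2 - 0) else none)
      = need.items.filterMap (fun p => some p) from List.filterMap_congr ?_, List.filterMap_some]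
  intro p hp
  have := hpos p hp
  simp [show (0:Int) < p.2 by omega]


lemma keys_filterMap_if (l : List (Char × Int)) (q : Char × Int → Prop) [DecidablePred q]
    (f : Char × Int → Int) :
    ((l.filterMap (fun p => if q p then some (p.1, f p) else none)).map Prod.fst).Sublist
      (l.map Prod.fst) := by
  induction l with
  | nil => simp
  | cons a t ih =>
    by_cases hq : q a
    · simpa [hq] using ih.cons₂ a.1
    · simp only [List.filterMap_cons, if_neg hq, List.map_cons]
      exact ih.cons a.1

lemma remove_pvSubD (need : PySem.Dict Char Int) (hnd : need.keys.Nodup) (r : Char → Int)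
    {c : Char} {v : Int} (hm : (c, v) ∈ need.items) (hlt : r c < v) :
    pvRemoveFromDict (pvSubD need r) c = pvSubD need (pvBump r c) := by
  have hku := key_unique (by simpa [PySem.Dict.keys] using hnd) hm
  have hmem : (c, v - r c) ∈ (pvSubD need r).items := by
    simp only [pvSubD]
    exact List.mem_filterMap.mpr ⟨(c, v), hm, by simp [hlt]⟩
  have hndsub : (pvSubD need r).keys.Nodup := by
    simp only [pvSubD, PySem.Dict.keys]
    have h0 : (need.items.map Prod.fst).Nodup := by simpa [PySem.Dict.keys] using hnd
    exact h0.sublist (keys_filterMap_if need.items (fun p => r p.1 < p.2) (fun p => p.2 - r p.1))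
  have hcont : (pvSubD need r).contains c = true :=
    (contains_pvSubD need r c).mpr ⟨(c, v), hm, rfl, hlt⟩
  have hget : (pvSubD need r).getD c 0 = v - r c :=
    PySem.Dict.getD_of_mem_items _ hmem hndsub 0
  unfold pvRemoveFromDict
  rw [hcont, if_pos rfl, hget]
  by_cases h1 : v - r c = 1
  · rw [if_pos h1]
    apply PySem.Dict.ext
    show ((pvSubD need r).items.filter _) = _
    simp only [pvSubD, List.filter_filterMap]
    apply List.filterMap_congr
    intro p hp
    by_cases hpc : p.1 = c
    · have hpe : p = (c, v) := hku p hp hpc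
      subst hpe
      simp only at hpc
      simp [pvBump, hlt, show ¬ (r c + 1 < v) by omega, Option.filter]
    · have hb : pvBump r c p.1 = r p.1 := by simp [pvBump, hpc]
      split
      · rename_i h; simp [Option.filter, hpc, hb, h]
      · rename_i h; simp [hb, h]
  · rw [if_neg h1]
    apply PySem.Dict.ext
    show ((pvSubD need r).insert c (v - r c - 1)).items = _
    rw [PySem.Dict.items_insert, if_pos hcont]
    simp only [pvSubD, List.map_filterMap]
    apply List.filterMap_congr
    intro p hp
    by_cases hpc : p.1 = c
    · have hpe : p = (c, v) := hku p hp hpc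
      subst hpe
      simp [pvBump, hlt, show r c + 1 < v by omega, show v - (r c + 1) = v - r c - 1 by ring]
    · have hb : pvBump r c p.1 = r p.1 := by simp [pvBump, hpc]
      split
      · rename_i h; simp [hpc, hb, h]
      · rename_i h; simp [hb, h]

lemma sum_map_pvBump {l : List (Char × Int)} (hnd : (l.map Prod.fst).Nodup)
    {c : Char} {v : Int} (hm : (c, v) ∈ l) (r : Char → Int) :
    (l.map (fun p => pvBump r c p.1)).sum = (l.map (fun p => r p.1)).sum + 1 := by
  induction l with
  | nil => simp at hm
  | cons a t ih =>
    simp only [List.map_cons, List.nodup_cons] at hnd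
    rcases List.mem_cons.mp hm with h | h
    · have hac : a.1 = c := by rw [← h]
      have hn : ∀ p ∈ t, p.1 ≠ c := by
        intro p hp hpc
        exact hnd.1 (by rw [hac]; simpa [hpc] using List.mem_map_of_mem (f := Prod.fst) hp)
      have : t.map (fun p => pvBump r c p.1) = t.map (fun p => r p.1) :=
        List.map_congr_left (fun p hp => by simp [pvBump, hn p hp])
      simp only [List.map_cons, List.sum_cons, this]
      simp [pvBump, hac]
      ring
    · have hac : a.1 ≠ c := fun hc =>
        hnd.1 (by simpa [hc] using List.mem_map_of_mem (f := Prod.fst) h)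
      simp only [List.map_cons, List.sum_cons, ih hnd.2 h]
      simp [pvBump, hac]
      ring

lemma coversIff (need run : PySem.Dict Char Int) :
    pvCovers need run = true ↔ ∀ p ∈ need.items, p.2 ≤ run.getD p.1 0 := by
  simp only [pvCovers, List.all_eq_true, decide_eq_true_eq, ge_iff_le]

lemma stepA_noremove (need : PySem.Dict Char Int) (bl : Int) (c : Char) (rest : List Char)
    (cd : PySem.Dict Char Int) (cl total : Int) (flag : Bool)
    (h1 : cd.contains c = false)
    (h2 : ¬ (cl = bl ∧ flag = true ∧ cd.size = 0))
    (h3 : need.contains c = true) :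
    pvLoopA need bl (c :: rest) cd cl total flag = pvLoopA need bl rest cd cl total flag := by
  simp only [pvLoopA, h1, h3]
  simp [h2]

lemma stepA_sep (need : PySem.Dict Char Int) (bl : Int) (c : Char) (rest : List Char)
    (cd : PySem.Dict Char Int) (cl total : Int) (flag : Bool)
    (h1 : cd.contains c = false)
    (h2 : ¬ (cl = bl ∧ flag = true ∧ cd.size = 0))
    (h3 : need.contains c = false) :
    pvLoopA need bl (c :: rest) cd cl total flag = pvLoopA need bl rest need 0 total false := by
  simp only [pvLoopA, h1, h3]
  simp [h2]

lemma stepA_remove_count (need : PySem.Dict Char Int) (bl : Int) (c : Char) (rest : List Char)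
    (cd cd' : PySem.Dict Char Int) (cl total : Int) (flag : Bool)
    (h1 : cd.contains c = true)
    (hrem : pvRemoveFromDict cd c = cd')
    (h2 : cl + 1 = bl) (hz : cd'.size = 0)
    (h3 : need.contains c = true) :
    pvLoopA need bl (c :: rest) cd cl total flag
      = pvLoopA need bl rest need (cl + 1) (total + 1) true := by
  simp only [pvLoopA, h1, h3, hrem]
  simp [h2, hz]

lemma stepA_remove_nocount (need : PySem.Dict Char Int) (bl : Int) (c : Char) (rest : List Char)
    (cd cd' : PySem.Dict Char Int) (cl total : Int) (flag : Bool)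
    (h1 : cd.contains c = true)
    (hrem : pvRemoveFromDict cd c = cd')
    (h2 : ¬ (cl + 1 = bl ∧ cd'.size = 0))
    (h3 : need.contains c = true) :
    pvLoopA need bl (c :: rest) cd cl total flag
      = pvLoopA need bl rest cd' (cl + 1) total true := by
  simp only [pvLoopA, h1, h3, hrem, if_true, true_and]
  rw [if_neg h2]
  simp

lemma loop_eq (need : PySem.Dict Char Int) (bl : Int)
    (hnd : need.keys.Nodup)
    (hpos : ∀ p ∈ need.items, (1:Int) ≤ p.2)
    (hne : need.items ≠ [])
    (hbl : bl = need.values.sum) :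
    ∀ (cs : List Char) (r : Char → Int) (counted : Bool)
      (run : PySem.Dict Char Int) (started : Bool) (tb : Int) (flag : Bool),
      (∀ p ∈ need.items, 0 ≤ r p.1 ∧ r p.1 ≤ p.2) →
      (∀ p ∈ need.items, r p.1 ≤ run.getD p.1 0) →
      (counted = false → ∀ p ∈ need.items, r p.1 < p.2 → run.getD p.1 0 = r p.1) →
      (counted = true → pvCovers need run = true) →
      (counted = false → ∃ p ∈ need.items, r p.1 < p.2) →
      (started = false → run = PySem.Dict.empty) →
      pvLoopA need bl cs (pvSubD need r)
        ((if counted then bl else 0) + (need.items.map (fun p => r p.1)).sum)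
        (tb + (if counted then 1 else 0)) flag
      = pvLoopB need cs run started tb := by
  have hndl : (need.items.map Prod.fst).Nodup := by simpa [PySem.Dict.keys] using hnd
  have hex : ∃ p, p ∈ need.items := by
    cases hi : need.items with
    | nil => exact absurd hi hne
    | cons a t => exact ⟨a, by simp [hi]⟩
  have hbl1 : 1 ≤ bl := by
    rw [hbl]
    cases hi : need.items with
    | nil => exact absurd hi hne
    | cons a t =>
      simp only [PySem.Dict.values, hi, List.map_cons, List.sum_cons]
      have h0 : (0:Int) ≤ (t.map (fun x => x.2)).sum := by
        apply List.sum_nonneg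
        intro x hx
        obtain ⟨p, hp, rfl⟩ := List.mem_map.mp hx
        have := hpos p (by simp [hi, hp])
        omega
      have := hpos a (by simp [hi])
      omega
  have sumFull : ∀ (r : Char → Int), (∀ p ∈ need.items, r p.1 = p.2) →
      (need.items.map (fun p => r p.1)).sum = bl := by
    intro r hr
    rw [hbl]
    simp only [PySem.Dict.values]
    congr 1
    exact List.map_congr_left (fun p hp => hr p hp)
  have sumZero : (need.items.map (fun p => (fun _ : Char => (0:Int)) p.1)).sum = 0 := by
    simp
  have flushEq : ∀ (counted started : Bool) (r : Char → Int) (run : PySem.Dict Char Int),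
      (counted = false → ∀ p ∈ need.items, r p.1 < p.2 → run.getD p.1 0 = r p.1) →
      (counted = true → pvCovers need run = true) →
      (counted = false → ∃ p ∈ need.items, r p.1 < p.2) →
      (started = false → run = PySem.Dict.empty) →
      (started && pvCovers need run) = counted := by
    intro counted started r run h3 h4 h5 h6
    cases counted with
    | false =>
      obtain ⟨p, hp, hd⟩ := h5 rfl
      have hg := h3 rfl p hp hd
      have hcov : pvCovers need run = false := by
        rw [Bool.eq_false_iff]
        intro hcv
        have := (coversIff need run).mp hcv p hp
        omega
      simp [hcov]
    | true =>
      have hcv := h4 rfl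
      have hst : started = true := by
        cases hst : started with
        | true => rfl
        | false =>
          exfalso
          obtain ⟨p, hp⟩ := hex
          have hple := (coversIff need run).mp hcv p hp
          rw [h6 hst, PySem.Dict.getD_empty] at hple
          have := hpos p hp
          omega
      simp [hst, hcv]
  intro cs
  induction cs with
  | nil =>
    intro r counted run started tb flag h1 h2 h3 h4 h5 h6
    have hsc := flushEq counted started r run h3 h4 h5 h6
    simp only [pvLoopA, pvLoopB, hsc]
    cases counted <;> simp
  | cons c rest ih =>
    intro r counted run started tb flag h1 h2 h3 h4 h5 h6
    have notC : ∀ fl : Bool,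
        ¬ ((if counted then bl else 0) + (need.items.map (fun p => r p.1)).sum = bl
            ∧ fl = true ∧ (pvSubD need r).size = 0) := by
      rintro fl ⟨he, -, hz⟩
      have hnod := (size_pvSubD_zero need r).mp hz
      cases hcnt : counted with
      | false =>
        obtain ⟨p, hp, hd⟩ := h5 hcnt
        exact hnod p hp hd
      | true =>
        have hful : ∀ p ∈ need.items, r p.1 = p.2 := by
          intro p hp
          have := (h1 p hp).2
          have := hnod p hp
          omega
        rw [hcnt, if_pos rfl, sumFull r hful] at he
        omega
    by_cases hc : need.contains c = true
    · -- c is a b-character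
      obtain ⟨v, hv⟩ : ∃ v, (c, v) ∈ need.items := by
        have hiso := PySem.Dict.contains_eq_isSome_get? need c
        rw [hc] at hiso
        obtain ⟨v, hv⟩ := Option.isSome_iff_exists.mp hiso.symm
        exact ⟨v, (PySem.Dict.get?_eq_some_iff_mem_items need c v hnd).mp hv⟩
      have hku := key_unique hndl hv
      have hrcv : 0 ≤ r c ∧ r c ≤ v := by simpa using h1 (c, v) hv
      have hgrc : r c ≤ run.getD c 0 := by simpa using h2 (c, v) hv
      set run' := run.insert c (run.getD c 0 + 1) with hrun'
      have hrunmono : ∀ p ∈ need.items, run.getD p.1 0 ≤ run'.getD p.1 0 := by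
        intro p hp
        by_cases hpc : p.1 = c
        · rw [hpc, hrun', PySem.Dict.getD_insert_self]
          have hle := h2 p hp
          rw [hpc] at hle
          omega
        · rw [hrun', PySem.Dict.getD_insert_of_ne run _ _ hpc]
      have h2' : ∀ p ∈ need.items, r p.1 ≤ run'.getD p.1 0 :=
        fun p hp => le_trans (h2 p hp) (hrunmono p hp)
      have hcovmono : pvCovers need run = true → pvCovers need run' = true := by
        intro hcov
        rw [coversIff] at hcov ⊢
        intro p hp
        exact le_trans (hcov p hp) (hrunmono p hp)
      have hBstep : pvLoopB need (c :: rest) run started tb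
          = pvLoopB need rest run' true tb := by
        simp only [pvLoopB, hc, if_true]
        rw [hrun']
      rcases lt_or_eq_of_le hrcv.2 with hlt | heq
      · -- removal happens
        have hsub : (pvSubD need r).contains c = true :=
          (contains_pvSubD need r c).mpr ⟨(c, v), hv, rfl, hlt⟩
        have hrem := remove_pvSubD need hnd r hv hlt
        have hsum := sum_map_pvBump hndl hv r
        have h1' : ∀ p ∈ need.items, 0 ≤ pvBump r c p.1 ∧ pvBump r c p.1 ≤ p.2 := by
          intro p hp
          by_cases hpc : p.1 = c
          · have hpe := hku p hp hpc
            subst hpe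
            simp only [pvBump, if_pos rfl]
            constructor
            · omega
            · simpa using hlt
          · simpa [pvBump, hpc] using h1 p hp
        have h2bump : ∀ p ∈ need.items, pvBump r c p.1 ≤ run'.getD p.1 0 := by
          intro p hp
          by_cases hpc : p.1 = c
          · rw [hpc, hrun', PySem.Dict.getD_insert_self]
            simp only [pvBump, if_pos rfl]
            omega
          · rw [hrun', PySem.Dict.getD_insert_of_ne run _ _ hpc]
            have := h2 p hp
            simpa [pvBump, hpc] using this
        by_cases hemp : (pvSubD need (pvBump r c)).size = 0
        · have hfull : ∀ p ∈ need.items, pvBump r c p.1 = p.2 := by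
            intro p hp
            have hn := (size_pvSubD_zero need (pvBump r c)).mp hemp p hp
            have := (h1' p hp).2
            omega
          have hSb : (need.items.map (fun p => pvBump r c p.1)).sum = bl := sumFull _ hfull
          have hvrc : r c + 1 = v := by
            have := hfull (c, v) hv
            simpa [pvBump] using this
          have hcov' : pvCovers need run' = true := by
            rw [coversIff]
            intro p hp
            by_cases hpc : p.1 = c
            · have hpe := hku p hp hpc
              subst hpe
              rw [hrun']
              simp only
              rw [PySem.Dict.getD_insert_self]
              omega
            · rw [hrun', PySem.Dict.getD_insert_of_ne run _ _ hpc]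
              have h2p := h2 p hp
              have hfp := hfull p hp
              simp only [pvBump, if_neg hpc] at hfp
              omega
          cases counted with
          | false =>
            have hcl : (if false then bl else 0) + (need.items.map (fun p => r p.1)).sum + 1 = bl := by
              simp only [if_neg Bool.false_ne_true]
              omega
            rw [stepA_remove_count need bl c rest _ _ _ _ flag hsub hrem hcl hemp hc, hBstep]
            rw [show (pvLoopA need bl rest need
                ((if false then bl else 0) + (need.items.map (fun p => r p.1)).sum + 1)
                (tb + (if false then 1 else 0) + 1) true)
              = (pvLoopA need bl rest need bl (tb + 1) true) by rw [hcl]; simp]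
            have := ih (fun _ => 0) true run' true tb true
              (fun p hp => ⟨le_refl 0, by show (0:Int) ≤ p.2; have := hpos p hp; omega⟩)
              (fun p hp => by show (0:Int) ≤ run'.getD p.1 0; exact le_trans (h1 p hp).1 (h2' p hp))
              (fun hco => absurd hco (by simp))
              (fun _ => hcov')
              (fun hco => absurd hco (by simp))
              (fun hst => absurd hst (by simp))
            rw [pvSubD_zero need hpos] at this
            rw [show ((if true then bl else 0) + (need.items.map (fun p => (fun _ : Char => (0:Int)) p.1)).sum) = bl by simp [sumZero]] at this
            rw [show (tb + (if true then 1 else 0)) = tb + 1 by simp] at this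
            exact this
          | true =>
            have hncl : ¬ ((if true then bl else 0) + (need.items.map (fun p => r p.1)).sum + 1 = bl
                ∧ (pvSubD need (pvBump r c)).size = 0) := by
              rintro ⟨he, -⟩
              simp only [eq_self_iff_true, if_true] at he
              omega
            rw [stepA_remove_nocount need bl c rest _ _ _ _ flag hsub hrem hncl hc, hBstep]
            have := ih (pvBump r c) true run' true tb true
              h1' h2bump
              (fun hco => absurd hco (by simp))
              (fun _ => hcovmono (h4 rfl))
              (fun hco => absurd hco (by simp))
              (fun hst => absurd hst (by simp))
            rw [show ((if true then bl else 0) + (need.items.map (fun p => pvBump r c p.1)).sum)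
                = (if true then bl else 0) + (need.items.map (fun p => r p.1)).sum + 1 by rw [hsum]; ring] at this
            exact this
        · -- removal, dictionary not emptied
          have hncl : ¬ ((if counted then bl else 0) + (need.items.map (fun p => r p.1)).sum + 1 = bl
              ∧ (pvSubD need (pvBump r c)).size = 0) := by
            rintro ⟨-, hz⟩
            exact hemp hz
          rw [stepA_remove_nocount need bl c rest _ _ _ _ flag hsub hrem hncl hc, hBstep]
          have h3' : counted = false → ∀ p ∈ need.items, pvBump r c p.1 < p.2 →
              run'.getD p.1 0 = pvBump r c p.1 := by
            intro hcnt p hp hd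
            by_cases hpc : p.1 = c
            · have hpe := hku p hp hpc
              subst hpe
              have h3c : run.getD c 0 = r c := by simpa using h3 hcnt (c, v) hv hlt
              have hbc : pvBump r c (c, v).1 = r c + 1 := by simp [pvBump]
              have hgd : run'.getD (c, v).1 0 = run.getD c 0 + 1 := by
                rw [hrun']
                exact PySem.Dict.getD_insert_self run c _ 0
              rw [hgd, hbc, h3c]
            · rw [hrun', PySem.Dict.getD_insert_of_ne run _ _ hpc]
              simp only [pvBump, if_neg hpc] at hd ⊢
              exact h3 hcnt p hp hd
          have h5' : counted = false → ∃ p ∈ need.items, pvBump r c p.1 < p.2 := by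
            intro hcnt
            by_contra hno
            push_neg at hno
            exact hemp ((size_pvSubD_zero need (pvBump r c)).mpr (fun p hp => not_lt.mpr (hno p hp)))
          have := ih (pvBump r c) counted run' true tb true
            h1' h2bump h3'
            (fun hcnt => hcovmono (h4 hcnt))
            h5'
            (fun hst => absurd hst (by simp))
          rw [show ((if counted then bl else 0) + (need.items.map (fun p => pvBump r c p.1)).sum)
              = (if counted then bl else 0) + (need.items.map (fun p => r p.1)).sum + 1 by rw [hsum]; ring] at this
          exact this
      · -- skip: c needed fully consumed already, no removal
        have hsub : (pvSubD need r).contains c = false := by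
          rw [Bool.eq_false_iff]
          intro hct
          obtain ⟨p, hp, hpc, hd⟩ := (contains_pvSubD need r c).mp hct
          have hpe := hku p hp hpc
          subst hpe
          simp only at hd
          omega
        rw [stepA_noremove need bl c rest _ _ _ flag hsub (notC flag) hc, hBstep]
        have h3' : counted = false → ∀ p ∈ need.items, r p.1 < p.2 →
            run'.getD p.1 0 = r p.1 := by
          intro hcnt p hp hd
          by_cases hpc : p.1 = c
          · exfalso
            have hpe := hku p hp hpc
            subst hpe
            simp only at hd
            omega
          · rw [hrun', PySem.Dict.getD_insert_of_ne run _ _ hpc]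
            exact h3 hcnt p hp hd
        exact ih r counted run' true tb flag h1 h2' h3'
          (fun hcnt => hcovmono (h4 hcnt)) h5 (fun hst => absurd hst (by simp))
    · -- separator
      have hc' : need.contains c = false := by simpa using hc
      have hsub : (pvSubD need r).contains c = false := by
        rw [Bool.eq_false_iff]
        intro hct
        obtain ⟨p, hp, hpc, -⟩ := (contains_pvSubD need r c).mp hct
        apply absurd ((PySem.Dict.contains_iff_mem_keys need c).mpr _) (by simp [hc'])
        rw [← hpc]
        exact List.mem_map_of_mem (f := Prod.fst) hp
      have hsc := flushEq counted started r run h3 h4 h5 h6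
      have hBstep : pvLoopB need (c :: rest) run started tb
          = pvLoopB need rest PySem.Dict.empty false
              (if started && pvCovers need run then tb + 1 else tb) := by
        simp only [pvLoopB, hc']
        simp
      rw [stepA_sep need bl c rest _ _ _ flag hsub (notC flag) hc', hBstep]
      have htb : tb + (if counted then 1 else 0)
          = (if started && pvCovers need run then tb + 1 else tb) + (if (false : Bool) then 1 else 0) := by
        rw [hsc]
        cases counted <;> simp
      have := ih (fun _ => 0) false PySem.Dict.empty false
        (if started && pvCovers need run then tb + 1 else tb) false
        (fun p hp => ⟨le_refl 0, by show (0:Int) ≤ p.2; have := hpos p hp; omega⟩)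
        (fun p hp => by show (0:Int) ≤ PySem.Dict.empty.getD p.1 0; rw [PySem.Dict.getD_empty])
        (fun _ p hp _ => by show PySem.Dict.empty.getD p.1 0 = 0; rw [PySem.Dict.getD_empty])
        (fun hcnt => absurd hcnt (by simp))
        (fun _ => by
          obtain ⟨p, hp⟩ := hex
          exact ⟨p, hp, by show (0:Int) < p.2; have := hpos p hp; omega⟩)
        (fun _ => rfl)
      rw [pvSubD_zero need hpos] at this
      rw [show ((if (false:Bool) then bl else 0) + (need.items.map (fun p => (fun _ : Char => (0:Int)) p.1)).sum) = 0 by simp [sumZero]] at this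
      rw [← htb] at this
      exact this
lemma makeDict_eq_counter (bs : List Char) : pvMakeDict bs = PySem.Dict.counter bs := by
  unfold pvMakeDict
  rw [← PySem.Dict.foldl_insert_getD_add_one_eq_counter]
  congr 1
  funext d c
  by_cases h : d.contains c = true
  · simp [h]
  · have h' : d.contains c = false := by simpa using h
    rw [if_pos h', PySem.Dict.getD_of_not_contains d 0 h']
    norm_num

lemma counter_values_sum (bs : List Char) :
    (PySem.Dict.counter bs).values.sum = (bs.length : Int) := by
  rw [PySem.Dict.values, PySem.Dict.items_counter, List.map_map]
  have hperm : (PySem.Set.ofList bs : List Char).Perm bs.dedup :=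
    (List.perm_ext_iff_of_nodup (PySem.Set.nodup_ofList bs) bs.nodup_dedup).mpr
      (fun a => by rw [PySem.Set.mem_ofList, List.mem_dedup])
  rw [List.Perm.sum_eq (hperm.map _)]
  have hlen := List.sum_map_count_dedup_eq_length bs
  calc (bs.dedup.map ((fun p => p.2) ∘ fun k => (k, (bs.count k : Int)))).sum
      = ((bs.dedup.map (fun x => List.count x bs)).map (Nat.cast : Nat → Int)).sum := by
        rw [List.map_map]
        rfl
    _ = ((bs.dedup.map (fun x => List.count x bs)).sum : Int) := (Nat.cast_list_sum _).symm
    _ = (bs.length : Int) := by rw [hlen]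

lemma counter_items_pos (bs : List Char) :
    ∀ p ∈ (PySem.Dict.counter bs).items, (1:Int) ≤ p.2 := by
  intro p hp
  rw [PySem.Dict.items_counter] at hp
  obtain ⟨k, hk, rfl⟩ := List.mem_map.mp hp
  have : k ∈ bs := (PySem.Set.mem_ofList bs k).mp hk
  have := List.count_pos_iff.mpr this
  simp
  omega

lemma counter_items_ne (bs : List Char) (h : bs ≠ []) :
    (PySem.Dict.counter bs).items ≠ [] := by
  rw [PySem.Dict.items_counter]
  intro hmap
  obtain ⟨x, hx⟩ := List.exists_mem_of_ne_nil bs h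
  have : x ∈ (PySem.Set.ofList bs : List Char) := (PySem.Set.mem_ofList bs x).mpr hx
  rw [List.map_eq_nil_iff.mp hmap] at this
  simp at this

lemma loopA_trivial (cs : List Char) :
    ∀ total : Int,
      pvLoopA PySem.Dict.empty 0 cs PySem.Dict.empty 0 total false = total := by
  induction cs with
  | nil => intro t; rfl
  | cons c rest ih =>
    intro t
    have hc : (PySem.Dict.empty : PySem.Dict Char Int).contains c = false :=
      PySem.Dict.contains_empty c
    simp only [pvLoopA, hc]
    simp only [Bool.false_eq_true, if_false, and_false, false_and, if_true]
    exact ih t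

lemma loopB_trivial (cs : List Char) :
    pvLoopB PySem.Dict.empty cs PySem.Dict.empty false 0 = 0 := by
  induction cs with
  | nil => rfl
  | cons c rest ih =>
    have hc : (PySem.Dict.empty : PySem.Dict Char Int).contains c = false :=
      PySem.Dict.contains_empty c
    simp only [pvLoopB, hc]
    simpa using ih

-- ===== VERDICT (by name: the statement is the Claim_ definition above) =====
theorem dothis_spec : Claim_unchanged_dothis := by
  unfold Claim_unchanged_dothis
  intro s b _
  unfold Spec_dothis
  intro hnD
  cases s with
  | none => cases b <;> rfl
  | some ss =>
    cases b with
    | none => rfl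
    | some bs =>
      by_cases hbs : bs = ""
      · subst hbs
        have hss : ss = "" := by
          by_contra h
          exact hnD ⟨rfl, by simp, by simpa using h⟩
        subst hss
        rfl
      · have hbl : bs.toList ≠ [] := by simpa using hbs
        show dothis (some ss) (some bs) = dothis_alt (some ss) (some bs)
        unfold dothis dothis_alt
        simp only
        by_cases hg : PySem.Str.len bs > PySem.Str.len ss
        · rw [if_pos hg, if_pos hg]
        · rw [if_neg hg, if_neg hg]
          show pvLoopA (pvMakeDict bs.toList) (PySem.Str.len bs) ss.toList
              (pvMakeDict bs.toList) 0 0 true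
            = pvLoopB (bs.toList.foldl (fun d c => d.insert c (d.getD c 0 + 1)) PySem.Dict.empty)
                ss.toList PySem.Dict.empty false 0
          rw [PySem.Dict.foldl_insert_getD_add_one_eq_counter, makeDict_eq_counter]
          have h1 := PySem.Dict.nodup_keys_counter bs.toList
          have h2 := counter_items_pos bs.toList
          have h3 := counter_items_ne bs.toList hbl
          have h4 : PySem.Str.len bs = (PySem.Dict.counter bs.toList).values.sum := by
            rw [counter_values_sum]
            simp [PySem.Str.len]
          have := loop_eq (PySem.Dict.counter bs.toList) (PySem.Str.len bs) h1 h2 h3 h4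
            ss.toList (fun _ => 0) false PySem.Dict.empty false 0 true
            (fun p hp => ⟨le_refl 0, by show (0:Int) ≤ p.2; have := h2 p hp; omega⟩)
            (fun p hp => by show (0:Int) ≤ PySem.Dict.empty.getD p.1 0; rw [PySem.Dict.getD_empty])
            (fun _ p hp _ => by show PySem.Dict.empty.getD p.1 0 = 0; rw [PySem.Dict.getD_empty])
            (fun hcnt => absurd hcnt (by simp))
            (fun _ => by
              obtain ⟨p, hp⟩ := List.exists_mem_of_ne_nil _ h3
              exact ⟨p, hp, by show (0:Int) < p.2; have := h2 p hp; omega⟩)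
            (fun _ => rfl)
          rw [pvSubD_zero _ h2] at this
          rw [show ((if (false:Bool) then PySem.Str.len bs else 0)
              + ((PySem.Dict.counter bs.toList).items.map (fun p => (fun _ : Char => (0:Int)) p.1)).sum) = 0 by simp] at this
          rw [show ((0:Int) + (if (false:Bool) then 1 else 0)) = 0 by simp] at this
          exact this

theorem dothis_changed : Claim_changed_dothis := by
  unfold Claim_changed_dothis; decide

theorem dothis_tight : Claim_exact_dothis := by
  unfold Claim_exact_dothis
  intro s b _ hD
  obtain ⟨hb, hs, hss⟩ := hD
  subst hb
  cases s with
  | none => exact absurd rfl hs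
  | some t =>
    have ht : t ≠ "" := fun h => hss (by rw [h])
    have htl : t.toList ≠ [] := by simpa using ht
    cases hcs : t.toList with
    | nil => exact absurd hcs htl
    | cons c rest =>
      show dothis (some t) (some "") ≠ dothis_alt (some t) (some "")
      unfold dothis dothis_alt
      simp only
      have hg : ¬ PySem.Str.len "" > PySem.Str.len t := by
        have h0 : PySem.Str.len "" = 0 := by simp [PySem.Str.len]
        have h1 : (0:Int) ≤ PySem.Str.len t := by simp [PySem.Str.len]
        omega
      rw [if_neg hg, if_neg hg]
      show pvLoopA (pvMakeDict "".toList) (PySem.Str.len "") t.toList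
          (pvMakeDict "".toList) 0 0 true
        ≠ pvLoopB ("".toList.foldl (fun d c => d.insert c (d.getD c 0 + 1)) PySem.Dict.empty)
            t.toList PySem.Dict.empty false 0
      have hmt : pvMakeDict "".toList = PySem.Dict.empty := rfl
      have hnt : ("".toList.foldl (fun d c => d.insert c (d.getD c 0 + 1)) PySem.Dict.empty)
          = (PySem.Dict.empty : PySem.Dict Char Int) := rfl
      have hl0 : PySem.Str.len "" = 0 := by simp [PySem.Str.len]
      rw [hmt, hnt, hcs, hl0]
      -- A counts once on the first character, then stays frozen
      have hA : pvLoopA PySem.Dict.empty 0 (c :: rest) PySem.Dict.empty 0 0 true = 1 := by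
        have hc : (PySem.Dict.empty : PySem.Dict Char Int).contains c = false :=
          PySem.Dict.contains_empty c
        simp only [pvLoopA, hc]
        simp [PySem.Dict.size, PySem.Dict.empty]
        exact loopA_trivial rest 1
      have hB : pvLoopB PySem.Dict.empty (c :: rest) PySem.Dict.empty false 0 = 0 := by
        have hc : (PySem.Dict.empty : PySem.Dict Char Int).contains c = false :=
          PySem.Dict.contains_empty c
        simp only [pvLoopB, hc]
        simpa using loopB_trivial rest
      rw [hA, hB]
      decide
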